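/- GENERATED by mk_final_copies.py from the proof of the farm's unit `start_decoder.C8d` (farm:start_decoder.C8d.1: Lemmas.lean) as the
   re-elaboration sweep compiled it — do not edit. -/
import Asan.CheckWalk
import Vorbis.Spec.Units.start_decoder_C8d

open X86 X86.User Asan Vorbis Vorbis.Spec Vorbis.Spec.StartDecoder

set_option maxRecDepth 100000
set_option maxHeartbeats 4000000

namespace Vorbis.Spec.start_decoder_C8d

/-! ### 1. What segment C8d may write, and the fields of the struct it keeps -/

/-- **A window of a footprint of segment C8d**: stack bytes below the steady rsp (the pushed return addresses, the frame of
compute_sorted_huffman), the pointer field `c->sorted_values` `[c + 838H, c + 840H)`, or bytes of a table allocated since the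
snapshot `Aw` (`sorted_codewords`, the `sorted_values` block, the final `codeword_lengths` of a sparse book). -/
def W8 (g : Ghost) (Aw : Arena) (A : Arena × List Obj) (c : Nat) (w : Span) : Prop :=
  (g.R - 408 ≤ w.lo ∧ w.hi ≤ g.R) ∨
  (c + 2104 ≤ w.lo ∧ w.hi ≤ c + 2112) ∨
  (∃ C : Block, Since Aw A.1 C ∧ C.base ≤ w.lo ∧ w.hi ≤ C.base + C.size)

/-- **Every field of the struct at `c` but `sorted_values` reads the same in two memories** (the store 0x114aa3 changes that
field): what `Core8` reads of the struct. -/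
structure SameBut (m m' : Mem) (c : Nat) : Prop where
  dimensions : Codebook.dimensions m' c = Codebook.dimensions m c
  entries : Codebook.entries m' c = Codebook.entries m c
  codeword_lengths : Codebook.codeword_lengths m' c = Codebook.codeword_lengths m c
  lookup_type : Codebook.lookup_type m' c = Codebook.lookup_type m c
  sparse : Codebook.sparse m' c = Codebook.sparse m c
  lookup_values : Codebook.lookup_values m' c = Codebook.lookup_values m c
  multiplicands : Codebook.multiplicands m' c = Codebook.multiplicands m c
  codewords : Codebook.codewords m' c = Codebook.codewords m c
  sorted_codewords : Codebook.sorted_codewords m' c = Codebook.sorted_codewords m c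
  sorted_entries : Codebook.sorted_entries m' c = Codebook.sorted_entries m c

/-- The fields from the two kept parts of the struct. -/
theorem SameBut.of_eqOn {m m' : Mem} {c : Nat} (hc : c + 2120 ≤ 2 ^ 64) (b1 : Mem.EqOn c (c + 2104) m m')
    (b2 : Mem.EqOn (c + 2112) (c + 2120) m m') : SameBut m m' c := by
  constructor
  · simp only [vacc, voff]
    exact b1.i32 _ (by omega) (by omega) (by omega)
  · simp only [vacc, voff]
    exact b1.i32 _ (by omega) (by omega) (by omega)
  · simp only [vacc, voff]
    exact b1.u64 _ (by omega) (by omega) (by omega)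
  · simp only [vacc, voff]
    exact b1.u8 _ (by omega) (by omega) (by omega)
  · simp only [vacc, voff]
    exact b1.u8 _ (by omega) (by omega) (by omega)
  · simp only [vacc, voff]
    exact b1.u32 _ (by omega) (by omega) (by omega)
  · simp only [vacc, voff]
    exact b1.u64 _ (by omega) (by omega) (by omega)
  · simp only [vacc, voff]
    exact b1.u64 _ (by omega) (by omega) (by omega)
  · simp only [vacc, voff]
    exact b1.u64 _ (by omega) (by omega) (by omega)
  · simp only [vacc, voff]
    exact b2.i32 _ (by omega) (by omega) (by omega)

/-! ### 2. `Core8` (and the memory part of `Frame` + `Cur`) through a footprint of `W8` windows -/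

/-- **`Core8` through a footprint of `W8` windows** (the pushes, the store of `c->sorted_values`, the sentinel store, the
footprint of compute_sorted_huffman): `MInv` by `MInv.step`, CUR(i) from it, the fields of the struct but `sorted_values` by
`SameBut`, the `lengths` array kept (a block older than `Aw`, or the temp block P1). Also returned: `MInv` of the new memory (for
`MInv.frame`), `cb(i)` unmoved, the field equalities. -/
theorem core_through {g : Ghost} {i : Nat} {A2 A3 Ai Aw Ab : Arena} {A : Arena × List Obj} {lengths values : Nat}
    {v v' : State} (h : Core8 g i A2 A3 Ai Aw Ab A lengths values v) (hm0 : MInv g i A2 A3 Ai A v.mem) (hp : Pos g A)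
    {ws : List Span} (hs : Mem.SameExcept ws v.mem v'.mem) (hun : ShadowUntouched v.mem v'.mem)
    (hw : ∀ w, w ∈ ws → W8 g Aw A (g.cb v.mem i) w)
    (r14 : v'.reg .r14 = v.reg .r14) (rbx : v'.reg .rbx = v.reg .rbx) (r12 : v'.reg .r12 = v.reg .r12) :
    Core8 g i A2 A3 Ai Aw Ab A lengths values v' ∧ MInv g i A2 A3 Ai A v'.mem ∧ g.cb v'.mem i = g.cb v.mem i ∧
      SameBut v.mem v'.mem (g.cb v.mem i) := by
  have ha : ArenaOK A.1 A.2 v.mem g.f := h.cur.sd.arena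
  have hcw := hm0.c_where
  have extw' : Aw.Extends A.1 := C8.core_extw' h
  have exti' : Ai.Extends A.1 := h.extw.trans extw'
  have p1 := hp.r_eq
  have p2 := hp.ra_lo
  have p3 := hp.ra_hi
  -- every window is a window of `MInv.step`
  have hwin : ∀ w, w ∈ ws → OkWin g Ai A (g.cb v.mem i) w := by
    intro w hww
    rcases hw w hww with h1 | h2 | ⟨C, hC, c1, c2⟩
    · exact Or.inl (Or.inl h1)
    · refine Or.inl (Or.inr (Or.inr (Or.inr (Or.inl ?_))))
      omega
    · right
      have hi := arena_inside ha hC.1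
      refine ⟨by omega, by omega, ?_⟩
      intro B hB
      have hd := ha.old_disjoint_since exti' hB (hC.older h.extw)
      simp only [vblock] at hd
      omega
  have hb : Bits (g.Blk A) g.len v'.mem g.f := by
    apply bits_kept hp hm0.sd.bits hs
    intro w hww
    rcases hw w hww with h1 | h2 | ⟨C, hC, c1, c2⟩
    · left
      omega
    · right
      left
      omega
    · right
      left
      have hi := arena_inside ha hC.1
      omega
  obtain ⟨hm2, hcb2⟩ := hm0.step hp rfl hs hun hwin hb
  -- the struct but the field `sorted_values`
  have hsb : SameBut v.mem v'.mem (g.cb v.mem i) := by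
    apply SameBut.of_eqOn (by omega)
    · apply hs.eqOn
      intro w hww
      rcases hw w hww with h1 | h2 | ⟨C, hC, c1, c2⟩
      · omega
      · omega
      · have hy := young_off_book hm0 (hC.older h.extw)
        omega
    · apply hs.eqOn
      intro w hww
      rcases hw w hww with h1 | h2 | ⟨C, hC, c1, c2⟩
      · omega
      · omega
      · have hy := young_off_book hm0 (hC.older h.extw)
        omega
  -- the `lengths` array
  have hlenw : ∀ w, w ∈ ws → lengths + (Codebook.entries v.mem (g.cb v.mem i)).toNat ≤ w.lo ∨ w.hi ≤ lengths := by
    intro w hww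
    rcases h.k2.sparse_01 with hsp | hsp
    · have hl := h.dense_lengths hsp
      rw [← h.dense_eq hsp] at hl
      have hlA : A.1.Blk _ := hl.1.mono extw'
      have hst := ha.blk_off_stack hlA
      rcases hw w hww with h1 | h2 | ⟨C, hC, c1, c2⟩
      · simp only at hst
        omega
      · have hy := young_off_book hm0 (hl.mono extw')
        simp only at hy
        omega
      · have hd := ha.old_disjoint_since extw' hl.1 hC
        simp only [vblock] at hd
        omega
    · have t1 := (h.sparse_temps hsp).tblock (p := lengths)
        (List.mem_cons_of_mem _ (List.mem_cons_of_mem _ List.mem_cons_self))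
      have hst := ha.tblock_off t1
      have hcbA : A.1.Blk (codebooksBlock v.mem g.f) := hm0.ages.cbOK.F2.mono hm0.ages.exti
      have hci := hm0.ages.cbOK.cb_in i hm0.lt
      rcases hw w hww with h1 | h2 | ⟨C, hC, c1, c2⟩
      · omega
      · have hd := ha.blk_tblock_disjoint hcbA t1
        unfold Ghost.cb at h2
        simp only [vblock, voff] at hd hci
        omega
      · have hd := ha.blk_tblock_disjoint hC.1 t1
        simp only [vblock] at hd
        omega
  have hlenB : lengths + (Codebook.entries v.mem (g.cb v.mem i)).toNat ≤ 2 ^ 64 := by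
    rcases h.k2.sparse_01 with hsp | hsp
    · have hl := h.dense_lengths hsp
      rw [← h.dense_eq hsp] at hl
      have := ha.blkOK.no_wrap (hl.1.mono extw')
      simp only [] at this
      exact this
    · have t1 := (h.sparse_temps hsp).tblock (p := lengths)
        (List.mem_cons_of_mem _ (List.mem_cons_of_mem _ List.mem_cons_self))
      have hst := ha.tblock_off t1
      omega
  have hlen : (Block.mk lengths (Codebook.entries v.mem (g.cb v.mem i)).toNat).Kept v.mem v'.mem :=
    Block.Kept.of_sameExcept hs hlenw hlenB
  have hlenE := hlen.same
  have hlenI := hlen.inside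
  simp only [vblock] at hlenE hlenI
  have eused : usedCount v'.mem lengths (Codebook.entries v.mem (g.cb v.mem i)).toNat =
      usedCount v.mem lengths (Codebook.entries v.mem (g.cb v.mem i)).toNat := C7.usedCount_same hlenE hlenI
  have elong : longCount v'.mem lengths (Codebook.entries v.mem (g.cb v.mem i)).toNat =
      longCount v.mem lengths (Codebook.entries v.mem (g.cb v.mem i)).toNat := C7.longCount_same hlenE hlenI
  have hcur : Cur g i A2 A3 Ai A v' := by
    apply hm2.cur h.cur.hand
    rw [hcb2, r14]
    exact h.cur.r14
  refine ⟨?_, hm2, hcb2, hsb⟩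
  have e := hsb
  refine
    { cur := hcur
      extw := h.extw
      extb := h.extb
      extb' := h.extb'
      k1 := ?_
      k2 := ?_
      rbx := ?_
      r12 := ?_
      lenL := ?_
      dense_values := ?_
      dense_lengths := ?_
      dense_codewords := ?_
      dense_eq := ?_
      dense_temps := ?_
      dense_cnt := ?_
      sparse_lengths := ?_
      sparse_temps := ?_
      sparse_cnt := ?_
      fresh := ?_ }
  · rw [hcb2]
    have k := h.k1
    refine ⟨?_, ?_, ?_, ?_⟩
    · rw [e.dimensions]
      exact k.dim_pos
    · rw [e.dimensions]
      exact k.dim_le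
    · rw [e.entries]
      exact k.ent_nonneg
    · rw [e.entries]
      exact k.ent_lt
  · rw [hcb2]
    have k := h.k2
    refine ⟨?_, ?_, ?_, ?_, ?_⟩
    · rw [e.sparse]
      exact k.sparse_01
    · rw [e.sorted_entries]
      exact k.se_nonneg
    · rw [e.sorted_entries, e.entries]
      exact k.se_le
    · rw [e.sparse, e.sorted_entries]
      exact k.sparse_pos
    · rw [e.sparse, e.sorted_entries, e.entries]
      exact k.sparse_quarter
  · rw [rbx]
    exact h.rbx
  · rw [r12]
    exact h.r12
  · rw [hcb2, e.entries]
    exact h.lenL.same hlenE hlenI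
  · rw [hcb2, e.sparse]
    exact h.dense_values
  · rw [hcb2, e.sparse, e.codeword_lengths, e.entries]
    exact h.dense_lengths
  · rw [hcb2, e.sparse, e.codewords, e.entries]
    exact h.dense_codewords
  · rw [hcb2, e.sparse, e.codeword_lengths]
    exact h.dense_eq
  · rw [hcb2, e.sparse]
    exact h.dense_temps
  · rw [hcb2, e.sparse]
    intro hsp
    have := h.dense_cnt hsp
    unfold CNT' at this ⊢
    rw [e.entries, e.sorted_entries, elong]
    exact this
  · rw [hcb2, e.sparse, e.codeword_lengths, e.sorted_entries]
    exact h.sparse_lengths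
  · rw [hcb2, e.sparse, e.codewords, e.sorted_entries, e.entries]
    exact h.sparse_temps
  · rw [hcb2, e.sparse]
    intro hsp
    have := h.sparse_cnt hsp
    unfold CNT at this ⊢
    rw [e.entries, e.sorted_entries, eused]
    exact this
  · rw [hcb2]
    have hf := h.fresh
    refine ⟨?_, ?_, ?_⟩
    · rw [e.lookup_type]
      exact hf.lookup_type
    · rw [e.lookup_values]
      exact hf.lookup_values
    · rw [e.multiplicands]
      exact hf.multiplicands

/-! ### 3. The precondition of compute_sorted_huffman -/

/-- A block inside a block that is disjoint from `X` is disjoint from `X`. -/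
theorem disj_inside {B C X : Block} (hd : B.disjoint X) (h1 : B.base ≤ C.base) (h2 : C.base + C.size ≤ B.base + B.size) :
    C.disjoint X := by
  simp only [vblock] at hd ⊢
  omega

/-- Five blocks are apart when the ten pairs are disjoint. -/
theorem apart5 {a b c d e : Block} (ab : a.disjoint b) (ac : a.disjoint c) (ad : a.disjoint d) (ae : a.disjoint e)
    (bc : b.disjoint c) (bd : b.disjoint d) (be : b.disjoint e) (cd : c.disjoint d) (ce : c.disjoint e)
    (de : d.disjoint e) : Apart [a, b, c, d, e] := by
  simp only [Apart, List.pairwise_cons, List.mem_cons, or_false, forall_eq_or_imp, forall_eq,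
    List.not_mem_nil, false_imp_iff, implies_true, List.Pairwise.nil, and_true]
  exact ⟨⟨ab, ac, ad, ae⟩, ⟨bc, bd, be⟩, ⟨cd, ce⟩, de⟩

/-- Seven blocks are apart when the twenty-one pairs are disjoint. -/
theorem apart7 {a b c d e f g : Block} (ab : a.disjoint b) (ac : a.disjoint c) (ad : a.disjoint d) (ae : a.disjoint e)
    (af : a.disjoint f) (ag : a.disjoint g)
    (bc : b.disjoint c) (bd : b.disjoint d) (be : b.disjoint e) (bf : b.disjoint f) (bg : b.disjoint g)
    (cd : c.disjoint d) (ce : c.disjoint e) (cf : c.disjoint f) (cg : c.disjoint g)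
    (de : d.disjoint e) (df : d.disjoint f) (dg : d.disjoint g) (ef : e.disjoint f) (eg : e.disjoint g)
    (fg : f.disjoint g) : Apart [a, b, c, d, e, f, g] := by
  simp only [Apart, List.pairwise_cons, List.mem_cons, or_false, forall_eq_or_imp, forall_eq,
    List.not_mem_nil, false_imp_iff, implies_true, List.Pairwise.nil, and_true]
  exact ⟨⟨ab, ac, ad, ae, af, ag⟩, ⟨bc, bd, be, bf, bg⟩, ⟨cd, ce, cf, cg⟩, ⟨de, df, dg⟩, ⟨ef, eg⟩, fg⟩

/-- **compute_sorted_huffman's precondition** (S3's `SortedHuffmanPre`) for a state `s` at the callee's entry where `Core8`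
holds, the pointer `sorted_values` is incremented (`sorted_values − 4` is the base of the block allocated since `Ac`), the sentinel
is stored and the `se` words behind it are still zero: rdi = c, rsi = lengths, rdx = values. The two `apart` clauses: the struct is
in the codebooks block (a block of `Ai`), `codeword_lengths` / `codewords` / `sorted_codewords` / the `sorted_values` block were
allocated in four consecutive periods, the temp blocks P3, P2, P1 form a chain apart from every setup block. -/
theorem sortedPre_of_core {g : Ghost} {i : Nat} {A2 A3 Ai Aw Ab Ac : Arena} {A : Arena × List Obj} {lengths values : Nat}
    {s : State} (h : Core8 g i A2 A3 Ai Aw Ab A lengths values s) (hbc : Ab.Extends Ac) (hca : Ac.Extends A.1)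
    (hsh : ShadowPre A.2 g.frames' s)
    (hrdi : (s.reg .rdi).toNat = g.cb s.mem i) (hrsi : (s.reg .rsi).toNat = lengths)
    (hrdx : (s.reg .rdx).toNat = values)
    (hval : Codebook.sparse s.mem (g.cb s.mem i) = 1 →
      VAL s.mem values (Codebook.sorted_entries s.mem (g.cb s.mem i)).toNat (Codebook.entries s.mem (g.cb s.mem i)).toNat)
    (hse : 1 ≤ Codebook.sorted_entries s.mem (g.cb s.mem i))
    (hsc : Since Ab Ac ⟨Codebook.sorted_codewords s.mem (g.cb s.mem i),
      4 * ((Codebook.sorted_entries s.mem (g.cb s.mem i)).toNat + 1)⟩)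
    (hsv : Since Ac A.1 ⟨Codebook.sorted_values s.mem (g.cb s.mem i) - 4,
      4 * ((Codebook.sorted_entries s.mem (g.cb s.mem i)).toNat + 1)⟩)
    (hsent : s.mem.i32 (Codebook.sorted_values s.mem (g.cb s.mem i) - 4) = -1)
    (hz : ZeroFill s.mem (Codebook.sorted_values s.mem (g.cb s.mem i))
      (4 * (Codebook.sorted_entries s.mem (g.cb s.mem i)).toNat)) :
    SortedHuffmanPre A.2 g.frames' (C7.blkT A) s := by
  have ha : ArenaOK A.1 A.2 s.mem g.f := h.cur.sd.arena
  have hcb := h.cur.ages.cbOK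
  have hci := hcb.cb_in i h.cur.lt
  have extw' : Aw.Extends A.1 := C8.core_extw' h
  have exti' : Ai.Extends A.1 := h.extw.trans extw'
  have hcbA : A.1.Blk (codebooksBlock s.mem g.f) := hcb.F2.mono h.cur.ages.exti
  have hk2 := h.k2
  have hscA : A.1.Blk ⟨Codebook.sorted_codewords s.mem (g.cb s.mem i),
      4 * ((Codebook.sorted_entries s.mem (g.cb s.mem i)).toNat + 1)⟩ := hsc.1.mono hca
  refine
    { shadow := hsh
      live := C7.blkT_live ha
      book := ?_
      bookLive := ?_
      K1 := ?_
      K2 := ?_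
      se_pos := ?_
      K3t := ?_
      K4 := ?_
      scLive := ?_
      zv := ?_
      lens := ?_
      dense := ?_
      sparse := ?_
      apartDense := ?_
      apartSparse := ?_ }
  · rw [hrdi]
    exact ⟨_, Or.inl hcbA, hci⟩
  · rw [hrdi]
    obtain ⟨o, ho, o1, o2⟩ := Vorbis.Spec.liveIn_of_arenaBlk (frames := g.frames') ha hcbA
    refine ⟨o, ho, ?_, ?_⟩
    · simp only [vblock, voff] at hci o1 ⊢
      unfold Ghost.cb
      omega
    · simp only [vblock, voff] at hci o2 ⊢
      unfold Ghost.cb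
      omega
  · rw [hrdi]
    exact h.k1
  · rw [hrdi]
    exact hk2
  · rw [hrdi]
    exact hse
  · rw [hrdi]
    refine ⟨?_, ?_, ?_⟩
    · intro hs
      exact ⟨Or.inl ((h.dense_lengths hs).1.mono extw'), Or.inl ((h.dense_codewords hs).1.mono h.extb')⟩
    · intro hs
      exact Or.inl ((h.sparse_lengths hs).1.mono h.extb')
    · intro hs
      right
      exact (h.sparse_temps hs).tblock (List.mem_cons_of_mem _ List.mem_cons_self)
  · rw [hrdi]
    refine ⟨?_, ?_, ?_, ?_⟩
    · intro _
      exact Or.inl hscA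
    · intro _
      exact Or.inl hsv.1
    · intro _
      exact hsent
    · intro h0
      omega
  · rw [hrdi]
    obtain ⟨o, ho, o1, o2⟩ := Vorbis.Spec.liveIn_of_arenaBlk (frames := g.frames') ha hscA
    refine ⟨o, ho, ?_, ?_⟩
    · simp only at o1 ⊢
      exact o1
    · simp only at o2 ⊢
      omega
  · rw [hrdi]
    apply ZV.of_zeroFill hz
    have := hk2.se_le
    omega
  · rw [hrdi, hrsi]
    rcases hk2.sparse_01 with hs | hs
    · left
      have := (h.dense_lengths hs).1.mono extw'
      rw [← h.dense_eq hs] at this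
      exact this
    · right
      exact (h.sparse_temps hs).tblock (List.mem_cons_of_mem _ (List.mem_cons_of_mem _ List.mem_cons_self))
  · rw [hrdi, hrsi]
    intro hs
    exact ⟨h.dense_eq hs, h.dense_cnt hs⟩
  · rw [hrdi, hrdx]
    intro hs
    have hs1 : Codebook.sparse s.mem (g.cb s.mem i) = 1 := hk2.sparse_01.resolve_left hs
    exact ⟨Or.inr ((h.sparse_temps hs1).tblock List.mem_cons_self), hval hs1⟩
  · rw [hrdi]
    intro hs
    have hl := h.dense_lengths hs
    have hcwd := h.dense_codewords hs
    have hcA : (Codebook.block (g.cb s.mem i)).base + (Codebook.block (g.cb s.mem i)).size ≤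
        (codebooksBlock s.mem g.f).base + (codebooksBlock s.mem g.f).size ∧
        (codebooksBlock s.mem g.f).base ≤ (Codebook.block (g.cb s.mem i)).base := by
      unfold Ghost.cb
      simp only [vblock, voff] at hci ⊢
      omega
    unfold cwBlock Codebook.clBlock scBlock
    rw [Codebook.N_dense hs]
    apply apart5
    · exact disj_inside (ha.old_disjoint_since exti' hcb.F2 (hl.mono extw')) hcA.2 hcA.1
    · exact disj_inside (ha.old_disjoint_since exti' hcb.F2 ((hcwd.older h.extw).mono h.extb')) hcA.2 hcA.1
    · exact disj_inside (ha.old_disjoint_since exti' hcb.F2 ((hsc.older (h.extw.trans h.extb)).mono hca)) hcA.2 hcA.1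
    · exact disj_inside (ha.old_disjoint_since exti' hcb.F2 (hsv.older ((h.extw.trans h.extb).trans hbc))) hcA.2 hcA.1
    · exact ha.since_disjoint_since extw' hl (hcwd.mono h.extb')
    · exact ha.since_disjoint_since extw' hl ((hsc.older h.extb).mono hca)
    · exact ha.since_disjoint_since extw' hl (hsv.older (h.extb.trans hbc))
    · exact ha.since_disjoint_since h.extb' hcwd (hsc.mono hca)
    · exact ha.since_disjoint_since h.extb' hcwd (hsv.older hbc)
    · exact ha.since_disjoint_since hca hsc hsv
  · rw [hrdi, hrsi, hrdx]
    intro hs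
    have hs1 : Codebook.sparse s.mem (g.cb s.mem i) = 1 := hk2.sparse_01.resolve_left hs
    have hl := h.sparse_lengths hs1
    have hT := h.sparse_temps hs1
    have t3 := hT.tblock (p := values) List.mem_cons_self
    have t2 := hT.tblock (p := Codebook.codewords s.mem (g.cb s.mem i)) (List.mem_cons_of_mem _ List.mem_cons_self)
    have t1 := hT.tblock (p := lengths) (List.mem_cons_of_mem _ (List.mem_cons_of_mem _ List.mem_cons_self))
    have hcA : (Codebook.block (g.cb s.mem i)).base + (Codebook.block (g.cb s.mem i)).size ≤
        (codebooksBlock s.mem g.f).base + (codebooksBlock s.mem g.f).size ∧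
        (codebooksBlock s.mem g.f).base ≤ (Codebook.block (g.cb s.mem i)).base := by
      unfold Ghost.cb
      simp only [vblock, voff] at hci ⊢
      omega
    -- the chain of the three temp blocks
    obtain ⟨ht, hB⟩ := hT
    have hch := ha.AR4
    rw [ht] at hch
    simp only [List.map, TempChain] at hch
    obtain ⟨c1, c2, c3, _⟩ := hch
    have b3 := hB _ List.mem_cons_self
    have b2 := hB _ (List.mem_cons_of_mem _ List.mem_cons_self)
    have b1 := hB _ (List.mem_cons_of_mem _ (List.mem_cons_of_mem _ List.mem_cons_self))
    simp only at b1 b2 b3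
    have r1 := le_r8 (4 * (Codebook.sorted_entries s.mem (g.cb s.mem i)).toNat)
    have hclA : A.1.Blk _ := hl.1.mono h.extb'
    unfold cwBlock Codebook.clBlock scBlock
    rw [Codebook.N_sparse hs]
    apply apart7
    · exact disj_inside (ha.old_disjoint_since exti' hcb.F2 ((hl.older h.extw).mono h.extb')) hcA.2 hcA.1
    · exact disj_inside (ha.blk_tblock_disjoint hcbA t2) hcA.2 hcA.1
    · exact disj_inside (ha.old_disjoint_since exti' hcb.F2 ((hsc.older (h.extw.trans h.extb)).mono hca)) hcA.2 hcA.1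
    · exact disj_inside (ha.old_disjoint_since exti' hcb.F2 (hsv.older ((h.extw.trans h.extb).trans hbc))) hcA.2 hcA.1
    · exact disj_inside (ha.blk_tblock_disjoint hcbA t1) hcA.2 hcA.1
    · exact disj_inside (ha.blk_tblock_disjoint hcbA t3) hcA.2 hcA.1
    · exact ha.blk_tblock_disjoint hclA t2
    · exact ha.since_disjoint_since h.extb' hl (hsc.mono hca)
    · exact ha.since_disjoint_since h.extb' hl (hsv.older hbc)
    · exact ha.blk_tblock_disjoint hclA t1
    · exact ha.blk_tblock_disjoint hclA t3
    · exact (ha.blk_tblock_disjoint hscA t2).symm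
    · exact (ha.blk_tblock_disjoint hsv.1 t2).symm
    · simp only [vblock]
      omega
    · simp only [vblock]
      omega
    · exact ha.since_disjoint_since hca hsc hsv
    · exact ha.blk_tblock_disjoint hscA t1
    · exact ha.blk_tblock_disjoint hscA t3
    · exact ha.blk_tblock_disjoint hsv.1 t1
    · exact ha.blk_tblock_disjoint hsv.1 t3
    · simp only [vblock]
      omega

/-! ### 4. The state at the entry of compute_sorted_huffman, and what comes back -/

/-- The two pointers `lengths`, `values` are addresses. -/
theorem core_bounds {g : Ghost} {i : Nat} {A2 A3 Ai Aw Ab : Arena} {A : Arena × List Obj} {lengths values : Nat} {v : State}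
    (h : Core8 g i A2 A3 Ai Aw Ab A lengths values v) : lengths < 2 ^ 64 ∧ values < 2 ^ 64 := by
  have ha := h.cur.sd.arena
  rcases h.k2.sparse_01 with hsp | hsp
  · have hl := h.dense_lengths hsp
    rw [← h.dense_eq hsp] at hl
    have ho := ha.block_off (hl.1.mono (C8.core_extw' h))
    simp only [] at ho
    have hv := h.dense_values hsp
    omega
  · have hT := h.sparse_temps hsp
    have t3 := hT.tblock (p := values) List.mem_cons_self
    have t1 := hT.tblock (p := lengths) (List.mem_cons_of_mem _ (List.mem_cons_of_mem _ List.mem_cons_self))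
    have o1 := ha.tblock_off t1
    have o3 := ha.tblock_off t3
    omega

/-- **VAL through a footprint of `W8` windows**: the temp block P3 = `values` of a sparse book lies off the stack, off the
codebooks block and off every setup block. -/
theorem val_through {g : Ghost} {i : Nat} {A2 A3 Ai Aw Ab : Arena} {A : Arena × List Obj} {lengths values : Nat}
    {v : State} {m' : Mem} (h : Core8 g i A2 A3 Ai Aw Ab A lengths values v) (hm0 : MInv g i A2 A3 Ai A v.mem) (hp : Pos g A)
    {ws : List Span} (hs : Mem.SameExcept ws v.mem m') (hw : ∀ w, w ∈ ws → W8 g Aw A (g.cb v.mem i) w)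
    (hsp : Codebook.sparse v.mem (g.cb v.mem i) = 1) {se e : Nat}
    (hse : se = (Codebook.sorted_entries v.mem (g.cb v.mem i)).toNat) (hval : VAL v.mem values se e) :
    VAL m' values se e := by
  have ha : ArenaOK A.1 A.2 v.mem g.f := h.cur.sd.arena
  have p1 := hp.r_eq
  have p2 := hp.ra_lo
  have p3 := hp.ra_hi
  have t3 := (h.sparse_temps hsp).tblock (p := values) List.mem_cons_self
  have hst := ha.tblock_off t3
  have hcbA : A.1.Blk (codebooksBlock v.mem g.f) := hm0.ages.cbOK.F2.mono hm0.ages.exti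
  have hci := hm0.ages.cbOK.cb_in i hm0.lt
  have hE : Mem.EqOn values (values + 4 * se) v.mem m' := by
    apply hs.eqOn
    intro w hww
    rw [hse]
    rcases hw w hww with h1 | h2 | ⟨C, hC, c1, c2⟩
    · omega
    · have hd := ha.blk_tblock_disjoint hcbA t3
      unfold Ghost.cb at h2
      simp only [vblock, voff] at hd hci
      omega
    · have hd := ha.blk_tblock_disjoint hC.1 t3
      simp only [vblock] at hd
      omega
  intro m hm
  rw [hE.u32 (values + 4 * m) (by omega) (by omega) (by omega)]
  exact hval m hm

/-- **What holds at the entry of compute_sorted_huffman (0x10b1e0, called from 0x114abf)**: `Core8`, the memory part of `Frame` +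
`Cur`, both tables with their ages — `sorted_values` already incremented, so the block's base is `sorted_values − 4` —, the sentinel
stored, the `se` words behind it still zero (ZV), VAL. -/
structure Ready (g : Ghost) (i : Nat) (A2 A3 Ai Aw Ab Ac : Arena) (A : Arena × List Obj) (lengths values : Nat)
    (s : State) : Prop where
  core : Core8 g i A2 A3 Ai Aw Ab A lengths values s
  minv : MInv g i A2 A3 Ai A s.mem
  extc : Ab.Extends Ac
  extc' : Ac.Extends A.1
  se_pos : 1 ≤ Codebook.sorted_entries s.mem (g.cb s.mem i)
  sc : Since Ab Ac ⟨Codebook.sorted_codewords s.mem (g.cb s.mem i),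
    4 * ((Codebook.sorted_entries s.mem (g.cb s.mem i)).toNat + 1)⟩
  sv : Since Ac A.1 ⟨Codebook.sorted_values s.mem (g.cb s.mem i) - 4,
    4 * ((Codebook.sorted_entries s.mem (g.cb s.mem i)).toNat + 1)⟩
  sv4 : 4 ≤ Codebook.sorted_values s.mem (g.cb s.mem i)
  sentinel : s.mem.i32 (Codebook.sorted_values s.mem (g.cb s.mem i) - 4) = -1
  val : Codebook.sparse s.mem (g.cb s.mem i) = 1 →
    VAL s.mem values (Codebook.sorted_entries s.mem (g.cb s.mem i)).toNat (Codebook.entries s.mem (g.cb s.mem i)).toNat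
  zf : ZeroFill s.mem (Codebook.sorted_values s.mem (g.cb s.mem i))
    (4 * (Codebook.sorted_entries s.mem (g.cb s.mem i)).toNat)

/-- **`Ready` from `At8M3` over the stores of the segment** (three pushed return addresses at `[R − 8, R)`, the pointer field
`[c + 838H, c + 840H)` := `b + 4`, the sentinel `[b, b + 4)` := `0xffffffff`; `b` = the base of the `sorted_values` block). -/
theorem Ready.of_stores {g : Ghost} {i : Nat} {A2 A3 Ai Aw Ab Ac : Arena} {A : Arena × List Obj} {lengths values : Nat}
    {v s : State} (hco : Core8 g i A2 A3 Ai Aw Ab A lengths values v) (hm0 : MInv g i A2 A3 Ai A v.mem) (hp : Pos g A)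
    (hval : Codebook.sparse v.mem (g.cb v.mem i) = 1 →
      VAL v.mem values (Codebook.sorted_entries v.mem (g.cb v.mem i)).toNat (Codebook.entries v.mem (g.cb v.mem i)).toNat)
    (hse : 1 ≤ Codebook.sorted_entries v.mem (g.cb v.mem i))
    (hbc : Ab.Extends Ac) (hca : Ac.Extends A.1)
    (hsc : Since Ab Ac ⟨Codebook.sorted_codewords v.mem (g.cb v.mem i),
      4 * ((Codebook.sorted_entries v.mem (g.cb v.mem i)).toNat + 1)⟩)
    (hsv : Since Ac A.1 ⟨Codebook.sorted_values v.mem (g.cb v.mem i),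
      4 * ((Codebook.sorted_entries v.mem (g.cb v.mem i)).toNat + 1)⟩)
    (hzf : ZeroFill v.mem (Codebook.sorted_values v.mem (g.cb v.mem i))
      (4 * ((Codebook.sorted_entries v.mem (g.cb v.mem i)).toNat + 1)))
    (hs : Mem.SameExcept [⟨g.R - 8, g.R⟩, ⟨g.cb v.mem i + 2104, g.cb v.mem i + 2112⟩,
      ⟨Codebook.sorted_values v.mem (g.cb v.mem i), Codebook.sorted_values v.mem (g.cb v.mem i) + 4⟩] v.mem s.mem)
    (hun : ShadowUntouched v.mem s.mem)
    (hstored : Codebook.sorted_values s.mem (g.cb v.mem i) = Codebook.sorted_values v.mem (g.cb v.mem i) + 4)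
    (hsent : s.mem.u32 (Codebook.sorted_values v.mem (g.cb v.mem i)) = 4294967295)
    (r14 : s.reg .r14 = v.reg .r14) (rbx : s.reg .rbx = v.reg .rbx) (r12 : s.reg .r12 = v.reg .r12) :
    Ready g i A2 A3 Ai Aw Ab Ac A lengths values s ∧ g.cb s.mem i = g.cb v.mem i := by
  have ha : ArenaOK A.1 A.2 v.mem g.f := hco.cur.sd.arena
  have p1 := hp.r_eq
  have p2 := hp.ra_lo
  have p3 := hp.ra_hi
  have hsvw : Since Aw A.1 ⟨Codebook.sorted_values v.mem (g.cb v.mem i),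
      4 * ((Codebook.sorted_entries v.mem (g.cb v.mem i)).toNat + 1)⟩ := hsv.older (hco.extb.trans hbc)
  have hw : ∀ w, w ∈ [(⟨g.R - 8, g.R⟩ : Span), ⟨g.cb v.mem i + 2104, g.cb v.mem i + 2112⟩,
      ⟨Codebook.sorted_values v.mem (g.cb v.mem i), Codebook.sorted_values v.mem (g.cb v.mem i) + 4⟩] →
      W8 g Aw A (g.cb v.mem i) w := by
    intro w hww
    simp only [List.mem_cons, List.mem_nil_iff, or_false] at hww
    rcases hww with rfl | rfl | rfl
    · left
      simp only
      omega
    · right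
      left
      simp only
      omega
    · right
      right
      refine ⟨_, hsvw, ?_, ?_⟩
      · simp only
        exact Nat.le_refl _
      · simp only
        omega
  obtain ⟨hco1, hm1, ecb1, e⟩ := core_through hco hm0 hp hs hun hw r14 rbx r12
  refine ⟨?_, ecb1⟩
  have hoff := ha.blk_off_stack hsv.1
  have hbo := ha.block_off hsv.1
  have hy := young_off_book hm0 (hsvw.older hco.extw)
  simp only at hoff hy hbo
  refine
    { core := hco1
      minv := hm1
      extc := hbc
      extc' := hca
      se_pos := ?_
      sc := ?_
      sv := ?_
      sv4 := ?_
      sentinel := ?_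
      val := ?_
      zf := ?_ }
  · rw [ecb1, e.sorted_entries]
    exact hse
  · rw [ecb1, e.sorted_codewords, e.sorted_entries]
    exact hsc
  · rw [ecb1, hstored, e.sorted_entries, Nat.add_sub_cancel]
    exact hsv
  · rw [ecb1, hstored]
    omega
  · rw [ecb1, hstored, Nat.add_sub_cancel]
    show sint32 (s.mem.u32 _) = -1
    rw [hsent]
    rfl
  · rw [ecb1, e.sparse, e.sorted_entries, e.entries]
    intro hsp
    exact val_through hco hm0 hp hs hw hsp rfl (hval hsp)
  · rw [ecb1, hstored, e.sorted_entries]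
    have hz1 := hzf.sub (Codebook.sorted_values v.mem (g.cb v.mem i) + 4)
      (4 * (Codebook.sorted_entries v.mem (g.cb v.mem i)).toNat) (by omega) (by omega)
    apply hz1.same
    · apply hs.eqOn
      intro w hww
      simp only [List.mem_cons, List.mem_nil_iff, or_false] at hww
      rcases hww with rfl | rfl | rfl
      · simp only
        omega
      · simp only
        omega
      · simp only
        omega
    · omega

/-- **The precondition of compute_sorted_huffman from `Ready`** at the callee's entry state. -/
theorem Ready.pre {g : Ghost} {i : Nat} {A2 A3 Ai Aw Ab Ac : Arena} {A : Arena × List Obj} {lengths values : Nat}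
    {s : State} (h : Ready g i A2 A3 Ai Aw Ab Ac A lengths values s) (hsh : ShadowPre A.2 g.frames' s)
    (hrdi : (s.reg .rdi).toNat = g.cb s.mem i) (hrsi : (s.reg .rsi).toNat = lengths)
    (hrdx : (s.reg .rdx).toNat = values) : SortedHuffmanPre A.2 g.frames' (C7.blkT A) s :=
  sortedPre_of_core h.core h.extc h.extc' hsh hrdi hrsi hrdx h.val h.se_pos h.sc h.sv h.sentinel h.zf

/-- **Back from compute_sorted_huffman**: its footprint — the frame below the pushed return address, `sorted_codewords[0 .. se]`,
`sorted_values[0 .. se)`, for a sparse book `codeword_lengths[0 .. se)` — consists of `W8` windows that miss the struct and the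
sentinel word `sorted_values[−1]`: `Core8` and the memory part of `Frame` + `Cur` again, K4 over the blocks allocated since `Ai`
(the sentinel by the footprint), K4c = the callee's post ZV. -/
theorem Ready.through {g : Ghost} {i : Nat} {A2 A3 Ai Aw Ab Ac : Arena} {A : Arena × List Obj} {lengths values : Nat}
    {s s' : State} (h : Ready g i A2 A3 Ai Aw Ab Ac A lengths values s) (hp : Pos g A)
    (hrdi : (s.reg .rdi).toNat = g.cb s.mem i) (hrsp : (s.reg .rsp).toNat = g.R - 8)
    (hsame : Mem.SameExcept (⟨(s.reg .rsp).toNat - 336, (s.reg .rsp).toNat⟩ ::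
      compute_sorted_huffman.wins s.mem (s.reg .rdi).toNat) s.mem s'.mem)
    (hun : ShadowUntouched s.mem s'.mem)
    (hzv : ZV s'.mem (Codebook.sorted_values s.mem (s.reg .rdi).toNat)
      (Codebook.sorted_entries s.mem (s.reg .rdi).toNat).toNat (Codebook.entries s.mem (s.reg .rdi).toNat))
    (r14 : s'.reg .r14 = s.reg .r14) (rbx : s'.reg .rbx = s.reg .rbx) (r12 : s'.reg .r12 = s.reg .r12) :
    Core8 g i A2 A3 Ai Aw Ab A lengths values s' ∧ MInv g i A2 A3 Ai A s'.mem ∧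
      Codebook.K4 (Since Ai A.1) s'.mem (g.cb s'.mem i) ∧ Codebook.K4c s'.mem (g.cb s'.mem i) := by
  have hco := h.core
  have hm0 := h.minv
  have ha : ArenaOK A.1 A.2 s.mem g.f := hco.cur.sd.arena
  have p1 := hp.r_eq
  have p2 := hp.ra_lo
  have p3 := hp.ra_hi
  have hcw := hm0.c_where
  have hsv4 := h.sv4
  rw [hrdi, hrsp] at hsame
  rw [hrdi] at hzv
  have hscw : Since Aw A.1 ⟨Codebook.sorted_codewords s.mem (g.cb s.mem i),
      4 * ((Codebook.sorted_entries s.mem (g.cb s.mem i)).toNat + 1)⟩ := (h.sc.older hco.extb).mono h.extc'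
  have hsvw : Since Aw A.1 ⟨Codebook.sorted_values s.mem (g.cb s.mem i) - 4,
      4 * ((Codebook.sorted_entries s.mem (g.cb s.mem i)).toNat + 1)⟩ := h.sv.older (hco.extb.trans h.extc)
  -- the four kinds of window: `W8`, off the struct, off the sentinel word
  have kStack : W8 g Aw A (g.cb s.mem i) ⟨g.R - 8 - 336, g.R - 8⟩ ∧
      (g.cb s.mem i + 2120 ≤ g.R - 8 - 336 ∨ g.R - 8 ≤ g.cb s.mem i) ∧
      (Codebook.sorted_values s.mem (g.cb s.mem i) ≤ g.R - 8 - 336 ∨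
        g.R - 8 ≤ Codebook.sorted_values s.mem (g.cb s.mem i) - 4) := by
    have hoff := ha.blk_off_stack h.sv.1
    simp only at hoff
    refine ⟨Or.inl ?_, ?_, ?_⟩
    · simp only
      omega
    · omega
    · omega
  have kSc : W8 g Aw A (g.cb s.mem i) (scBlock s.mem (g.cb s.mem i)).span ∧
      (g.cb s.mem i + 2120 ≤ (scBlock s.mem (g.cb s.mem i)).span.lo ∨
        (scBlock s.mem (g.cb s.mem i)).span.hi ≤ g.cb s.mem i) ∧
      (Codebook.sorted_values s.mem (g.cb s.mem i) ≤ (scBlock s.mem (g.cb s.mem i)).span.lo ∨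
        (scBlock s.mem (g.cb s.mem i)).span.hi ≤ Codebook.sorted_values s.mem (g.cb s.mem i) - 4) := by
    have hy := young_off_book hm0 (hscw.older hco.extw)
    have hd := ha.since_disjoint_since h.extc' h.sc h.sv
    unfold scBlock
    simp only [vblock] at hy hd ⊢
    refine ⟨Or.inr (Or.inr ⟨_, hscw, Nat.le_refl _, Nat.le_refl _⟩), ?_, ?_⟩
    · omega
    · omega
  have kSv : W8 g Aw A (g.cb s.mem i) ⟨Codebook.sorted_values s.mem (g.cb s.mem i),
        Codebook.sorted_values s.mem (g.cb s.mem i) + 4 * (Codebook.sorted_entries s.mem (g.cb s.mem i)).toNat⟩ ∧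
      (g.cb s.mem i + 2120 ≤ Codebook.sorted_values s.mem (g.cb s.mem i) ∨
        Codebook.sorted_values s.mem (g.cb s.mem i) + 4 * (Codebook.sorted_entries s.mem (g.cb s.mem i)).toNat ≤
          g.cb s.mem i) := by
    have hy := young_off_book hm0 (hsvw.older hco.extw)
    simp only at hy
    refine ⟨Or.inr (Or.inr ⟨_, hsvw, ?_, ?_⟩), ?_⟩
    · simp only
      omega
    · simp only
      omega
    · omega
  have kCl : Codebook.sparse s.mem (g.cb s.mem i) = 1 →
      W8 g Aw A (g.cb s.mem i) (Codebook.clBlock s.mem (g.cb s.mem i)).span ∧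
      (g.cb s.mem i + 2120 ≤ (Codebook.clBlock s.mem (g.cb s.mem i)).span.lo ∨
        (Codebook.clBlock s.mem (g.cb s.mem i)).span.hi ≤ g.cb s.mem i) ∧
      (Codebook.sorted_values s.mem (g.cb s.mem i) ≤ (Codebook.clBlock s.mem (g.cb s.mem i)).span.lo ∨
        (Codebook.clBlock s.mem (g.cb s.mem i)).span.hi ≤ Codebook.sorted_values s.mem (g.cb s.mem i) - 4) := by
    intro hsp
    have hne : Codebook.sparse s.mem (g.cb s.mem i) ≠ 0 := by omega
    have hl := hco.sparse_lengths hsp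
    have hlw : Since Aw A.1 _ := hl.mono hco.extb'
    have hy := young_off_book hm0 (hlw.older hco.extw)
    have hd := ha.since_disjoint_since hco.extb' hl (h.sv.older h.extc)
    unfold Codebook.clBlock
    rw [Codebook.N_sparse hne]
    simp only [vblock] at hy hd ⊢
    refine ⟨Or.inr (Or.inr ⟨_, hlw, Nat.le_refl _, Nat.le_refl _⟩), ?_, ?_⟩
    · omega
    · omega
  -- the footprint as a list of such windows
  obtain ⟨ws, hws, key⟩ : ∃ ws : List Span, Mem.SameExcept ws s.mem s'.mem ∧ ∀ w, w ∈ ws →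
      W8 g Aw A (g.cb s.mem i) w ∧ (g.cb s.mem i + 2120 ≤ w.lo ∨ w.hi ≤ g.cb s.mem i) ∧
      (Codebook.sorted_values s.mem (g.cb s.mem i) ≤ w.lo ∨
        w.hi ≤ Codebook.sorted_values s.mem (g.cb s.mem i) - 4) := by
    rcases hco.k2.sparse_01 with hsp | hsp
    · rw [compute_sorted_huffman.wins_dense _ _ hsp] at hsame
      refine ⟨_, hsame, ?_⟩
      intro w hww
      simp only [List.mem_cons, List.mem_nil_iff, or_false] at hww
      rcases hww with rfl | rfl | rfl
      · exact kStack
      · exact kSc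
      · exact ⟨kSv.1, kSv.2, Or.inl (Nat.le_refl _)⟩
    · have hne : Codebook.sparse s.mem (g.cb s.mem i) ≠ 0 := by omega
      rw [compute_sorted_huffman.wins_sparse _ _ hne] at hsame
      refine ⟨_, hsame, ?_⟩
      intro w hww
      simp only [List.mem_cons, List.mem_nil_iff, or_false] at hww
      rcases hww with rfl | rfl | rfl | rfl
      · exact kStack
      · exact kSc
      · exact ⟨kSv.1, kSv.2, Or.inl (Nat.le_refl _)⟩
      · exact kCl hsp
  obtain ⟨hco2, hm2, ecb2, e⟩ := core_through hco hm0 hp hws hun (fun w hw => (key w hw).1) r14 rbx r12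
  -- the pointer field and the sentinel word are outside the footprint
  have esv : Codebook.sorted_values s'.mem (g.cb s.mem i) = Codebook.sorted_values s.mem (g.cb s.mem i) := by
    have hE : Mem.EqOn (g.cb s.mem i + 2104) (g.cb s.mem i + 2112) s.mem s'.mem := by
      apply hws.eqOn
      intro w hw
      have := (key w hw).2.1
      omega
    simp only [vacc, voff]
    exact hE.u64 _ (Nat.le_refl _) (Nat.le_refl _) (by omega)
  have esent : s'.mem.i32 (Codebook.sorted_values s.mem (g.cb s.mem i) - 4) =
      s.mem.i32 (Codebook.sorted_values s.mem (g.cb s.mem i) - 4) := by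
    have hbo := ha.block_off h.sv.1
    simp only at hbo
    have hE : Mem.EqOn (Codebook.sorted_values s.mem (g.cb s.mem i) - 4)
        (Codebook.sorted_values s.mem (g.cb s.mem i)) s.mem s'.mem := by
      apply hws.eqOn
      intro w hw
      have := (key w hw).2.2
      omega
    exact hE.i32 _ (Nat.le_refl _) (by omega) (by omega)
  have hse := h.se_pos
  refine ⟨hco2, hm2, ?_, ?_⟩
  · rw [ecb2]
    refine ⟨?_, ?_, ?_, ?_⟩
    · rw [e.sorted_entries, e.sorted_codewords]
      intro _
      exact hscw.older hco.extw
    · rw [e.sorted_entries, esv]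
      intro _
      exact hsvw.older hco.extw
    · rw [e.sorted_entries, esv, esent]
      intro _
      exact h.sentinel
    · rw [e.sorted_entries]
      intro h0
      omega
  · intro x hx
    rw [ecb2, e.sorted_entries] at hx
    have hx' : x < (Codebook.sorted_entries s.mem (g.cb s.mem i)).toNat := by omega
    have hz := hzv x hx'
    rw [ecb2]
    simp only [Codebook.sorted_values_at]
    rw [esv, e.entries]
    exact hz

/-- **`Ready` for the memory the walker has at 0x114abf** (the nest of the five stores of the segment over the memory of the cut
point): the footprint, the shadow, the stored pointer and the sentinel read back. -/
theorem ready_of_nest {g : Ghost} {i : Nat} {A2 A3 Ai Aw Ab Ac : Arena} {A : Arena × List Obj} {lengths values : Nat}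
    {v s : State} (hco : Core8 g i A2 A3 Ai Aw Ab A lengths values v) (hm0 : MInv g i A2 A3 Ai A v.mem) (hp : Pos g A)
    (hval : Codebook.sparse v.mem (g.cb v.mem i) = 1 →
      VAL v.mem values (Codebook.sorted_entries v.mem (g.cb v.mem i)).toNat (Codebook.entries v.mem (g.cb v.mem i)).toNat)
    (hse : 1 ≤ Codebook.sorted_entries v.mem (g.cb v.mem i))
    (hbc : Ab.Extends Ac) (hca : Ac.Extends A.1)
    (hsc : Since Ab Ac ⟨Codebook.sorted_codewords v.mem (g.cb v.mem i),
      4 * ((Codebook.sorted_entries v.mem (g.cb v.mem i)).toNat + 1)⟩)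
    (hsv : Since Ac A.1 ⟨Codebook.sorted_values v.mem (g.cb v.mem i),
      4 * ((Codebook.sorted_entries v.mem (g.cb v.mem i)).toNat + 1)⟩)
    (hzf : ZeroFill v.mem (Codebook.sorted_values v.mem (g.cb v.mem i))
      (4 * ((Codebook.sorted_entries v.mem (g.cb v.mem i)).toNat + 1)))
    (sp cw : Word) (x1 x2 x3 : Nat) (hsp : sp.toNat + 8 = g.R) (hcw : cw = addr (g.cb v.mem i))
    (hmem : s.mem = ((((v.mem.writeLE sp 8 x1).writeLE (cw + 2104) 8
      (UInt64.ofNat (Codebook.sorted_values v.mem (g.cb v.mem i)) + 4).toNat).writeLE sp 8 x2).writeLE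
        (UInt64.ofNat (Codebook.sorted_values v.mem (g.cb v.mem i))) 4 4294967295).writeLE sp 8 x3)
    (r14 : s.reg .r14 = v.reg .r14) (rbx : s.reg .rbx = v.reg .rbx) (r12 : s.reg .r12 = v.reg .r12) :
    Ready g i A2 A3 Ai Aw Ab Ac A lengths values s ∧ g.cb s.mem i = g.cb v.mem i ∧ ShadowUntouched v.mem s.mem := by
  have ha : ArenaOK A.1 A.2 v.mem g.f := hco.cur.sd.arena
  have p1 := hp.r_eq
  have p2 := hp.ra_lo
  have p3 := hp.ra_hi
  have hcwh := hm0.c_where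
  have hbo := ha.block_off hsv.1
  have hoff := ha.blk_off_stack hsv.1
  have hy := young_off_book hm0 (hsv.older ((hco.extw.trans hco.extb).trans hbc))
  simp only at hbo hoff hy
  obtain ⟨b, hb⟩ : ∃ b, b = Codebook.sorted_values v.mem (g.cb v.mem i) := ⟨_, rfl⟩
  rw [← hb] at hmem hbo hoff hy
  obtain ⟨c, hc⟩ : ∃ c, c = g.cb v.mem i := ⟨_, rfl⟩
  rw [← hc] at hcw hcwh hy
  have hbn : (UInt64.ofNat b).toNat = b := by
    rw [UInt64.toNat_ofNat']
    omega
  have hcn : (cw + 2104).toNat = c + 2104 := by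
    rw [hcw, addr_add_lit]
    exact toNat_addr _ (by omega)
  have hb4 : (UInt64.ofNat b + 4).toNat = b + 4 := by
    u_omega
  have hsA : Mem.SameExcept [⟨g.R - 8, g.R⟩, ⟨c + 2104, c + 2112⟩, ⟨b, b + 4⟩] v.mem s.mem := by
    rw [hmem]
    u_same
  have hunA : ShadowUntouched v.mem s.mem := by
    rw [hmem]
    v_untouched
  have hst : Codebook.sorted_values s.mem c = b + 4 := by
    show s.mem.readLE (addr (c + 2104)) 8 = b + 4
    have e1 : addr (c + 2104) = cw + 2104 := by
      rw [hcw, addr_add_lit]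
    rw [e1, hmem]
    u_read
  have hsent : s.mem.u32 b = 4294967295 := by
    show s.mem.readLE (UInt64.ofNat b) 4 = 4294967295
    rw [hmem]
    u_read
  subst hb
  subst hc
  obtain ⟨hrd, ecb⟩ := Ready.of_stores hco hm0 hp hval hse hbc hca hsc hsv hzf hsA hunA hst hsent r14 rbx r12
  exact ⟨hrd, ecb, hunA⟩


end Vorbis.Spec.start_decoder_C8d
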